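-- pv_equiv track=rewrite | github.com/modamaan/coding_challenge | stream1.py | max_occur_chance
-- ===== SOURCE A (Python) =====
-- def max_occur_chance(arr, lookup):
--     dic_count = {}
--
--     for key in lookup:
--         count = 0
--         for num in arr:
--             if num in lookup[key]:
--                 count += 1
--         dic_count[key] = count
--
--     max_key = None
--     max_count = -1
--     for key in dic_count:
--         if dic_count[key] > max_count:
--             max_count = dic_count[key]
--             max_key = key
--
--     return max_key
-- ===== SOURCE B (Python) =====
-- def max_occur_chance(arr, lookup):
--     freq = {}
--     for num in arr:
--         freq[num] = freq.get(num, 0) + 1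
--     max_key = None
--     max_count = -1
--     for key, values in lookup.items():
--         count = sum(freq.get(v, 0) for v in dict.fromkeys(values))
--         if count > max_count:
--             max_count = count
--             max_key = key
--     return max_key
-- ===== Notes on version B (the rewrite author's own statement) =====
-- stated objective: faster
-- what changed: Instead of scanning arr once per key with a linear membership test per element (O(K*N*M)), B builds a frequency dict of arr in one pass and, per key, sums the frequencies of the key's distinct values while tracking the max key in the same loop (O(N + K*M)).
import Mathlib
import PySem

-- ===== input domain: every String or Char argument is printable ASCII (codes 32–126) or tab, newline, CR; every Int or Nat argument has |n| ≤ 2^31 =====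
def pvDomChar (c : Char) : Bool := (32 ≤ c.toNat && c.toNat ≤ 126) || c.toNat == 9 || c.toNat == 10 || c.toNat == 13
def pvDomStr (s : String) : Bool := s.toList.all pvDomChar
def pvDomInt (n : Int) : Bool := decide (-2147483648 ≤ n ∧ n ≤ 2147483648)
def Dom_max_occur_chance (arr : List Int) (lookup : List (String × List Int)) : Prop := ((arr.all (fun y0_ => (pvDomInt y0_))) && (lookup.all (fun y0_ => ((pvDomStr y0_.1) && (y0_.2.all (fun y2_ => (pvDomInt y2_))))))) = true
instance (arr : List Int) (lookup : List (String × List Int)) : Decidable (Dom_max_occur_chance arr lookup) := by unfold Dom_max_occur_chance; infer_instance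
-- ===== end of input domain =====

-- B changes the algorithm: a frequency dict of arr built once, then per key the frequencies of its
-- distinct values are summed and the max key tracked in the same pass (O(N + K*M) instead of A's O(K*N*M)).

-- ===== PORT A =====
def max_occur_chance (arr : List Int) (lookup : List (String × List Int)) : Option String :=
  -- dic_count = {}; for key in lookup: count = 0; for num in arr: if num in lookup[key]: count += 1; dic_count[key] = count
  let dic_count : PySem.Dict String Int := lookup.foldl (fun d kv =>
      d.insert kv.1 (arr.foldl (fun count num =>
          if ((PySem.Dict.mk lookup).getD kv.1 []).contains num then count + 1 else count) 0))
    PySem.Dict.empty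
  -- max_key = None; max_count = -1; for key in dic_count: if dic_count[key] > max_count: …
  (dic_count.keys.foldl (fun (st : Option String × Int) key =>
      if dic_count.getD key 0 > st.2 then (some key, dic_count.getD key 0) else st)
    (none, -1)).1
  -- note: lookup[key] / dic_count[key] are ports of dict lookups on keys drawn from the dict itself,
  -- so the getD defaults are never used.

-- ===== PORT B =====
def max_occur_chance_alt (arr : List Int) (lookup : List (String × List Int)) : Option String :=
  -- freq = {}; for num in arr: freq[num] = freq.get(num, 0) + 1
  let freq : PySem.Dict Int Int := arr.foldl (fun d num => d.insert num (d.getD num 0 + 1)) PySem.Dict.empty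
  -- for key, values in lookup.items(): count = sum(freq.get(v, 0) for v in dict.fromkeys(values)); if count > max_count: …
  (lookup.foldl (fun (st : Option String × Int) kv =>
      let count := ((PySem.List.dedup kv.2).map (fun v => freq.getD v 0)).sum
      if count > st.2 then (some kv.1, count) else st)
    (none, -1)).1

-- ===== PRECONDITION & SPEC =====
-- Pre_ excludes association lists with duplicate keys: they represent no Python dict (a dict literal
-- collapses duplicates), so A's behaviour on them is not defined by the source.
def Pre_max_occur_chance (arr : List Int) (lookup : List (String × List Int)) : Prop :=
  (lookup.map Prod.fst).Nodup
instance (arr : List Int) (lookup : List (String × List Int)) : Decidable (Pre_max_occur_chance arr lookup) := by unfold Pre_max_occur_chance; infer_instance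
def pvWitness_max_occur_chance : List Int × (List (String × List Int)) :=
  ([1, 2, 2, 5], [("a", [1, 3]), ("b", [2, 4]), ("c", [])])
def Spec_max_occur_chance (arr : List Int) (lookup : List (String × List Int)) (out : Option String) : Prop := out = max_occur_chance_alt arr lookup
instance (arr : List Int) (lookup : List (String × List Int)) (out : Option String) : Decidable (Spec_max_occur_chance arr lookup out) := by unfold Spec_max_occur_chance; infer_instance

-- ===== CLAIM (what is proved, stated in full; the proofs are below) =====
def Claim_equal_max_occur_chance : Prop := ∀ (arr : List Int) (lookup : List (String × List Int)), Dom_max_occur_chance arr lookup → Pre_max_occur_chance arr lookup → Spec_max_occur_chance arr lookup (max_occur_chance arr lookup)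

-- ===== LEMMAS AND PROOFS =====

-- On a duplicate-free list d, the 0/1 indicator sum over d at n is the membership indicator.
lemma sum_map_ite_eq_indicator (d : List Int) (n : Int) (hd : d.Nodup) :
    (d.map (fun v => if v == n then (1 : Nat) else 0)).sum = if d.contains n then 1 else 0 := by
  induction d with
  | nil => simp
  | cons v t ih =>
    rcases List.nodup_cons.mp hd with ⟨hv, ht⟩
    simp only [List.map_cons, List.sum_cons, List.contains_cons, ih ht]
    by_cases h : v = n
    · subst h
      simp [List.contains_eq_mem, hv]
    · simp [beq_iff_eq, h, Ne.symm h]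

-- Counting arr-elements that lie in vals equals summing arr-multiplicities over the distinct values.
lemma countP_eq_sum_count (arr vals : List Int) :
    arr.countP (fun n => vals.contains n)
      = ((PySem.List.dedup vals).map (fun v => arr.count v)).sum := by
  induction arr with
  | nil => simp [List.count_nil]
  | cons n t ih =>
    have hmem : vals.contains n = (PySem.List.dedup vals).contains n := by
      simp [List.contains_eq_mem]
    rw [List.countP_cons]
    have : ((PySem.List.dedup vals).map (fun v => (n :: t).count v)).sum
        = ((PySem.List.dedup vals).map (fun v => t.count v)).sum
          + ((PySem.List.dedup vals).map (fun v => if v == n then (1 : Nat) else 0)).sum := by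
      rw [← List.sum_map_add]
      refine congrArg List.sum (List.map_congr_left ?_)
      intro v hv
      rw [List.count_cons]
      by_cases h : n = v
      · subst h; rfl
      · simp [beq_iff_eq, h, Ne.symm h]
    rw [this, sum_map_ite_eq_indicator _ _ (PySem.List.nodup_dedup vals), ih, hmem]

-- A's inner counting loop, as an Int, equals B's per-key frequency sum.
lemma countA_eq_countB (arr vals : List Int) :
    arr.foldl (fun count num => if vals.contains num then count + 1 else count) (0 : Int)
      = ((PySem.List.dedup vals).map (fun v =>
          (arr.foldl (fun d num => d.insert num (d.getD num 0 + 1)) PySem.Dict.empty).getD v 0)).sum := by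
  rw [PySem.List.foldl_if_add_one]
  rw [countP_eq_sum_count arr vals]
  have : ∀ v : Int,
      (arr.foldl (fun d num => d.insert num (d.getD num 0 + 1)) PySem.Dict.empty).getD v 0
        = (arr.count v : Int) := by
    intro v
    rw [PySem.Dict.foldl_insert_getD_add_one_eq_counter, PySem.Dict.getD_counter]
  simp only [this, zero_add]
  push_cast
  rw [List.map_map]
  simp only [Function.comp_def]

-- ===== VERDICT (by name: the statement is the Claim_ definition above) =====
theorem max_occur_chance_spec : Claim_equal_max_occur_chance := by
  intro arr lookup _hdom hpre
  unfold Pre_max_occur_chance at hpre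
  unfold Spec_max_occur_chance max_occur_chance max_occur_chance_alt
  dsimp only
  have hitems :
      (lookup.foldl (fun d kv =>
          d.insert kv.1 (arr.foldl (fun count num =>
            if ((PySem.Dict.mk lookup).getD kv.1 []).contains num then count + 1 else count) (0 : Int)))
        PySem.Dict.empty).items
      = lookup.map (fun kv => (kv.1,
          arr.foldl (fun count num =>
            if ((PySem.Dict.mk lookup).getD kv.1 []).contains num then count + 1 else count) (0 : Int))) := by
    have h := PySem.Dict.items_foldl_insert_fresh lookup (fun kv => kv.1)
      (fun kv => arr.foldl (fun count num =>
            if ((PySem.Dict.mk lookup).getD kv.1 []).contains num then count + 1 else count) (0 : Int))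
      PySem.Dict.empty (by intro a _; simp [PySem.Dict.contains_empty]) (by simpa using hpre)
    simpa using h
  have hkeysd :
      (lookup.foldl (fun d kv =>
          d.insert kv.1 (arr.foldl (fun count num =>
            if ((PySem.Dict.mk lookup).getD kv.1 []).contains num then count + 1 else count) (0 : Int)))
        PySem.Dict.empty).keys.Nodup := by
    simp only [PySem.Dict.keys, hitems, List.map_map]
    simpa using hpre
  have hkeys :
      (lookup.foldl (fun d kv =>
          d.insert kv.1 (arr.foldl (fun count num =>
            if ((PySem.Dict.mk lookup).getD kv.1 []).contains num then count + 1 else count) (0 : Int)))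
        PySem.Dict.empty).keys
      = lookup.map (fun kv => kv.1) := by
    simp only [PySem.Dict.keys, hitems, List.map_map]
    rfl
  have hgetd : ∀ kv ∈ lookup,
      (lookup.foldl (fun d kv =>
          d.insert kv.1 (arr.foldl (fun count num =>
            if ((PySem.Dict.mk lookup).getD kv.1 []).contains num then count + 1 else count) (0 : Int)))
        PySem.Dict.empty).getD kv.1 0
      = arr.foldl (fun count num =>
            if ((PySem.Dict.mk lookup).getD kv.1 []).contains num then count + 1 else count) (0 : Int) := by
    intro kv hkv
    have hmem : (kv.1,
        arr.foldl (fun count num =>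
            if ((PySem.Dict.mk lookup).getD kv.1 []).contains num then count + 1 else count) (0 : Int))
        ∈ (lookup.foldl (fun d kv =>
            d.insert kv.1 (arr.foldl (fun count num =>
              if ((PySem.Dict.mk lookup).getD kv.1 []).contains num then count + 1 else count) 0))
          PySem.Dict.empty).items := by
      rw [hitems]
      exact List.mem_map_of_mem hkv
    exact PySem.Dict.getD_of_mem_items _ hmem hkeysd 0
  have hmkkeys : (PySem.Dict.mk lookup).keys.Nodup := by
    simpa [PySem.Dict.keys] using hpre
  have hvals : ∀ kv ∈ lookup, (PySem.Dict.mk lookup).getD kv.1 [] = kv.2 := by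
    intro kv hkv
    exact PySem.Dict.getD_of_mem_items (PySem.Dict.mk lookup) hkv hmkkeys []
  rw [hkeys, List.foldl_map]
  refine congrArg Prod.fst (PySem.List.foldl_congr_mem lookup _ _ (none, -1) ?_)
  intro acc kv hkv
  rw [hgetd kv hkv, hvals kv hkv, countA_eq_countB]
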